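-- pv_equiv track=rewrite | github.com/pypi-data/pypi-mirror-389 | packages/uwscli/uwscli-0.4.0-py3-none-any.whl/uwscli/tinyuz.py | _compute_length_chunks
-- ===== SOURCE A (Python) =====
-- def _compute_length_chunks(value: int, pack_bit: int) -> tuple[int, int]:
--     count = 1
--     v = value
--     original = value
--     while True:
--         threshold = 1 << (count * pack_bit)
--         if v < threshold:
--             break
--         v -= threshold
--         count += 1
--     dec = original - v
--     adjusted = original - dec
--     return count, adjusted
-- ===== SOURCE B (Python) =====
-- def _compute_length_chunks(value: int, pack_bit: int) -> tuple[int, int]: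
--     T = 1 << pack_bit
--     if value < T:
--         return 1, value
--     if pack_bit == 0:
--         # every threshold is 1: the loop counts value down to 0
--         return value + 1, 0
--     X = value * (T - 1) + T
--     count = (X.bit_length() - 1) // pack_bit
--     S = ((1 << (pack_bit * count)) - T) // (T - 1)
--     return count, value - S
-- ===== Notes on version B (the rewrite author's own statement) =====
-- stated objective: alternative
-- what changed: Replaced A's repeated threshold-subtraction loop by a closed form: count is derived from the bit length of value*(T-1)+T (T = 1<<pack_bit) and the remainder by an exact geometric-sum division, with the degenerate pack_bit==0 case computed directly.
import Mathlib
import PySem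

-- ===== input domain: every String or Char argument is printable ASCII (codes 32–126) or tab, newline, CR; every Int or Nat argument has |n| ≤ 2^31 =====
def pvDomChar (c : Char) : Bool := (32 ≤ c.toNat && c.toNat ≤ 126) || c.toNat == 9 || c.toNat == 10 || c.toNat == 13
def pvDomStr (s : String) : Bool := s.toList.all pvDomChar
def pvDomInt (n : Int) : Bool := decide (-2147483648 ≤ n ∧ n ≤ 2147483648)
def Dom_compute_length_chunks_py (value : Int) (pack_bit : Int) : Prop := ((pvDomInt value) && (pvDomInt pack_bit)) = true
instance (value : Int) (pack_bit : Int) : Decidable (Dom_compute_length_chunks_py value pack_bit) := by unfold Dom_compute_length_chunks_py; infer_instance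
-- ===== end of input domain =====

-- B replaces A's threshold-subtraction loop by a closed form: count from the bit length of
-- value*(T-1)+T and the remainder from an exact geometric-sum division (objective: alternative).

-- ===== PORT A =====
-- A's while-loop as recursion on v; threshold = 1 << (count*pack_bit), exact while count*pack_bit ≥ 0 (holds on Pre_)
def clcLoop (pack_bit : Int) (count : Int) (v : Int) : Int × Int :=
  if v < 2 ^ (count * pack_bit).toNat then (count, v)
  else clcLoop pack_bit (count + 1) (v - 2 ^ (count * pack_bit).toNat)
termination_by v.toNat
decreasing_by
  have h1 : (1:Int) ≤ 2 ^ (count * pack_bit).toNat := one_le_pow₀ (by norm_num)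
  rename_i h2
  omega

def compute_length_chunks_py (value : Int) (pack_bit : Int) : Int × Int :=
  let r := clcLoop pack_bit 1 value
  let count := r.1
  let v := r.2
  let dec := value - v
  let adjusted := value - dec
  (count, adjusted)

-- ===== PORT B =====
def compute_length_chunks_py_alt (value : Int) (pack_bit : Int) : Int × Int :=
  let T : Int := 2 ^ pack_bit.toNat        -- 1 << pack_bit; exact on Pre_ (0 ≤ pack_bit)
  if value < T then (1, value)
  else if pack_bit = 0 then (value + 1, 0)
  else
    let X := value * (T - 1) + T
    let count : Int := PySem.Int.floordiv ((PySem.Int.bitLength X : Int) - 1) pack_bit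
    let S : Int := PySem.Int.floordiv (2 ^ (pack_bit * count).toNat - T) (T - 1)
    (count, value - S)

-- ===== PRECONDITION & SPEC =====
-- Pre_ excludes pack_bit < 0, on which Python A raises ValueError at '1 << (count * pack_bit)'.
def Pre_compute_length_chunks_py (value : Int) (pack_bit : Int) : Prop := 0 ≤ pack_bit
instance (value : Int) (pack_bit : Int) : Decidable (Pre_compute_length_chunks_py value pack_bit) := by unfold Pre_compute_length_chunks_py; infer_instance

def pvWitness_compute_length_chunks_py : Int × Int := (10, 2)

def Spec_compute_length_chunks_py (value : Int) (pack_bit : Int) (out : Int × Int) : Prop := out = compute_length_chunks_py_alt value pack_bit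
instance (value : Int) (pack_bit : Int) (out : Int × Int) : Decidable (Spec_compute_length_chunks_py value pack_bit out) := by unfold Spec_compute_length_chunks_py; infer_instance

-- ===== CLAIM (what is proved, stated in full; the proofs are below) =====
def Claim_equal_compute_length_chunks_py : Prop := ∀ (value : Int) (pack_bit : Int), Dom_compute_length_chunks_py value pack_bit → Pre_compute_length_chunks_py value pack_bit → Spec_compute_length_chunks_py value pack_bit (compute_length_chunks_py value pack_bit)

-- ===== LEMMAS AND PROOFS =====

-- partial geometric sum of thresholds: pgeo b k j = Σ_{i=0}^{j-1} 2^((k+i)*b)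
def pgeo (b : Nat) : Nat → Nat → Int
  | _, 0 => 0
  | k, j+1 => 2 ^ (k * b) + pgeo b (k+1) j

lemma pgeo_mul (b : Nat) : ∀ (j k : Nat), ((2:Int)^b - 1) * pgeo b k j = 2 ^ ((k+j)*b) - 2 ^ (k*b) := by
  intro j
  induction j with
  | zero => intro k; simp [pgeo]
  | succ j ih =>
    intro k
    have e1 : (2:Int)^((k+1)*b) = 2^b * 2^(k*b) := by rw [add_mul, one_mul, pow_add]; ring
    have e2 : k + 1 + j = k + (j+1) := by omega
    have h := ih (k+1)
    rw [e2] at h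
    simp only [pgeo, mul_add, h, e1]
    ring

lemma clcLoop_run (b : Nat) : ∀ (j k : Nat) (w : Int), 1 ≤ k →
    (∀ i, i < j → 2 ^ ((k+i)*b) ≤ w - pgeo b k i) →
    w - pgeo b k j < 2 ^ ((k+j)*b) →
    clcLoop (b:Int) (k:Int) w = (((k+j : Nat) : Int), w - pgeo b k j) := by
  intro j
  induction j with
  | zero =>
    intro k w hk _ hexit
    rw [clcLoop]
    have ht : (((k:Int) * (b:Int)).toNat) = k * b := by
      rw [← Nat.cast_mul, Int.toNat_natCast]
    rw [ht]
    simp [pgeo] at hexit ⊢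
    omega
  | succ j ih =>
    intro k w hk hsurv hexit
    have hge : (2:Int) ^ (k*b) ≤ w := by
      have h0 := hsurv 0 (by omega)
      simpa [pgeo] using h0
    rw [clcLoop]
    have ht : (((k:Int) * (b:Int)).toNat) = k * b := by
      rw [← Nat.cast_mul, Int.toNat_natCast]
    rw [ht, if_neg (by omega)]
    have hcast : ((k:Int) + 1) = ((k+1 : Nat) : Int) := by push_cast; ring
    rw [hcast]
    have hrec := ih (k+1) (w - 2 ^ (k*b)) (by omega)
      (by
        intro i hi
        have h1 := hsurv (i+1) (by omega)
        have ee : k + (i+1) = k + 1 + i := by omega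
        rw [ee] at h1
        simp only [pgeo] at h1
        linarith)
      (by
        have ee : k + (j+1) = k + 1 + j := by omega
        rw [ee] at hexit
        simp only [pgeo] at hexit
        linarith)
    rw [hrec]
    have ee : k + 1 + j = k + (j+1) := by omega
    rw [ee]
    simp only [pgeo, Prod.mk.injEq]
    exact ⟨trivial, by ring⟩

lemma clc_zero : ∀ (n : Nat) (k v : Int), v.toNat ≤ n →
    clcLoop 0 k v = if v < 1 then (k, v) else (k + v, 0) := by
  intro n
  induction n with
  | zero =>
    intro k v hv
    rw [clcLoop]
    simp only [mul_zero, Int.toNat_zero, pow_zero]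
    have h1 : v < 1 := by omega
    simp [h1]
  | succ n ih =>
    intro k v hv
    rw [clcLoop]
    simp only [mul_zero, Int.toNat_zero, pow_zero]
    by_cases h1 : v < 1
    · simp [h1]
    · rw [if_neg h1, if_neg h1, ih (k+1) (v-1) (by omega)]
      by_cases h2 : v - 1 < 1
      · have hv1 : v = 1 := by omega
        simp [hv1]
      · rw [if_neg h2]
        simp only [Prod.mk.injEq]
        exact ⟨by ring, trivial⟩

-- ===== VERDICT (by name: the statement is the Claim_ definition above) =====
theorem compute_length_chunks_py_spec : Claim_equal_compute_length_chunks_py := by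
  intro value pack_bit _ hpre
  unfold Spec_compute_length_chunks_py
  unfold Pre_compute_length_chunks_py at hpre
  set b : Nat := pack_bit.toNat with hbdef
  have hpb : pack_bit = (b:Int) := (Int.toNat_of_nonneg hpre).symm
  by_cases hb0 : pack_bit = 0
  · -- pack_bit = 0
    have hA := clc_zero value.toNat 1 value (le_refl _)
    simp only [compute_length_chunks_py, compute_length_chunks_py_alt, hb0, Int.toNat_zero,
      pow_zero, hA]
    by_cases hv : value < 1
    · simp [hv]
    · simp only [if_neg hv]
      simp [Prod.ext_iff]
      omega
  · -- pack_bit ≥ 1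
    have hb1 : 1 ≤ b := by omega
    set T : Int := 2 ^ b with hTdef
    have hT2 : (2:Int) ≤ T := by
      calc (2:Int) = 2^1 := (pow_one 2).symm
      _ ≤ 2^b := pow_le_pow_right₀ (by norm_num) hb1
    by_cases hvT : value < T
    · -- immediate exit
      have hA := clcLoop_run b 0 1 value (le_refl _) (by intro i hi; omega)
        (by simpa [pgeo, one_mul] using hvT)
      simp only [Nat.cast_one, Nat.add_zero] at hA
      simp only [compute_length_chunks_py, compute_length_chunks_py_alt]
      rw [hpb]
      simp only [Int.toNat_natCast]
      rw [← hTdef]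
      rw [hA, if_pos hvT]
      simp [pgeo]
    · -- main case: value ≥ T
      set X : Int := value * (T - 1) + T with hXdef
      have hXT2 : (2:Int) ^ (2*b) ≤ X := by
        have he : X - T^2 = (value - T) * (T - 1) := by rw [hXdef]; ring
        have h1 : 0 ≤ (value - T) * (T - 1) := mul_nonneg (by omega) (by omega)
        have h2 : (T:Int)^2 = 2^(2*b) := by rw [hTdef, ← pow_mul]; ring_nf
        omega
      have hXpos : 0 < X := by
        have hp : (0:Int) < 2^(2*b) := by positivity
        omega
      set Ln : Nat := PySem.Int.bitLength X with hLndef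
      have hXabs : (X.natAbs : Int) = X := Int.natAbs_of_nonneg (le_of_lt hXpos)
      have hup : X < 2 ^ Ln := by
        have h := PySem.Int.lt_two_pow_bitLength X
        calc X = (X.natAbs : Int) := hXabs.symm
        _ < ((2^Ln : Nat) : Int) := by exact_mod_cast h
        _ = 2^Ln := by push_cast; ring
      have hLn1 : 1 ≤ Ln := by
        by_contra h
        have h0 : Ln = 0 := by omega
        rw [h0] at hup; simp at hup; omega
      set L : Nat := Ln - 1 with hLdef
      have hLe : Ln = L + 1 := by omega
      have hlow : (2:Int) ^ L ≤ X := by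
        have h := PySem.Int.two_pow_bitLength_le X (by omega)
        rw [← hLndef, hLe] at h
        simp only [Nat.add_sub_cancel] at h
        calc (2:Int)^L = ((2^L : Nat) : Int) := by push_cast; ring
        _ ≤ (X.natAbs : Int) := by exact_mod_cast h
        _ = X := hXabs
      set c : Nat := L / b with hcdef
      have hbpos : 0 < b := hb1
      have hdm : b * c + L % b = L := by rw [hcdef]; exact Nat.div_add_mod L b
      have hmod : L % b < b := Nat.mod_lt _ hbpos
      have h2bL : 2 * b ≤ L := by
        have hstrict : (2:Int)^(2*b) < 2^(L+1) := lt_of_le_of_lt hXT2 (by rw [← hLe]; exact hup)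
        have hlt : 2*b < L + 1 := by
          by_contra hcon
          have h1 : L + 1 ≤ 2*b := by omega
          have h2 : (2:Int)^(L+1) ≤ 2^(2*b) := pow_le_pow_right₀ (by norm_num) h1
          omega
        omega
      have hc2 : 2 ≤ c := by
        rw [hcdef]
        exact (Nat.le_div_iff_mul_le hbpos).mpr (by omega)
      have hcbL : c * b ≤ L := by
        have h := Nat.div_mul_le_self L b
        rw [← hcdef] at h; exact h
      have hLcb : L + 1 ≤ (c+1) * b := by nlinarith [hdm, hmod]
      have hTcX : (2:Int) ^ (c*b) ≤ X :=
        le_trans (pow_le_pow_right₀ (by norm_num) hcbL) hlow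
      have hXTc1 : X < (2:Int) ^ ((c+1)*b) := by
        calc X < 2^(L+1) := by rw [← hLe]; exact hup
        _ ≤ 2^((c+1)*b) := pow_le_pow_right₀ (by norm_num) hLcb
      have hTm1 : (0:Int) < T - 1 := by omega
      -- run A's loop: it performs c - 1 subtractions
      have hA := clcLoop_run b (c-1) 1 value (le_refl _)
        (by
          intro i hi
          have hkey : (2:Int)^((2+i)*b) ≤ X := by
            refine le_trans (pow_le_pow_right₀ (by norm_num) ?_) hTcX
            exact Nat.mul_le_mul_right b (by omega)
          have hmul := pgeo_mul b i 1
          have hsplit : (2:Int)^((2+i)*b) = T * 2^((1+i)*b) := by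
            rw [hTdef, ← pow_add]; ring_nf
          have hle : (T - 1) * 2^((1+i)*b) ≤ (T - 1) * (value - pgeo b 1 i) := by
            have expand : (T - 1) * (value - pgeo b 1 i) = X - 2^((1+i)*b) := by
              rw [mul_sub, hmul, hXdef, hTdef]; ring
            rw [expand]
            nlinarith [hkey, hsplit]
          exact le_of_mul_le_mul_left hle hTm1)
        (by
          have hmul := pgeo_mul b (c-1) 1
          have hone : 1 + (c-1) = c := by omega
          rw [hone] at hmul
          have expand : (T - 1) * (value - pgeo b 1 (c-1)) = X - 2^(c*b) := by
            rw [mul_sub, hmul, hXdef, hTdef]; ring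
          have hsplit : (2:Int)^((c+1)*b) = T * 2^(c*b) := by
            rw [hTdef, ← pow_add]; ring_nf
          have hone2 : 1 + (c-1) = c := by omega
          rw [hone2]
          have hlt : (T - 1) * (value - pgeo b 1 (c-1)) < (T - 1) * 2^(c*b) := by
            rw [expand]; nlinarith [hXTc1, hsplit]
          exact lt_of_mul_lt_mul_left hlt (le_of_lt hTm1))
      have hone : 1 + (c-1) = c := by omega
      rw [hone] at hA
      simp only [Nat.cast_one] at hA
      -- B's count equals c
      have hbl : ((Ln : Int) - 1) = (L : Int) := by omega
      have hcount : PySem.Int.floordiv ((Ln : Int) - 1) ((b:Nat):Int) = ((c:Nat):Int) := by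
        rw [hbl, PySem.Int.floordiv_natCast, ← hcdef]
      -- B's S equals the geometric sum subtracted by the loop
      have hmul := pgeo_mul b (c-1) 1
      rw [hone] at hmul
      have hS : PySem.Int.floordiv (2 ^ (b*c) - T) (T - 1) = pgeo b 1 (c-1) := by
        have hnum : (2:Int) ^ (b*c) - T = (T - 1) * pgeo b 1 (c-1) := by
          rw [hmul, hTdef, Nat.mul_comm b c]; ring_nf
        rw [hnum, PySem.Int.floordiv_eq_ediv_of_pos hTm1,
          Int.mul_ediv_cancel_left _ (by omega)]
      -- assemble
      simp only [compute_length_chunks_py, compute_length_chunks_py_alt]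
      rw [hpb]
      simp only [Int.toNat_natCast]
      rw [← hTdef, hA, if_neg hvT, if_neg (by exact_mod_cast (by omega : ¬ b = 0) ∘ Nat.cast_injective.eq_iff.mp)]
      rw [← hXdef, ← hLndef, hcount]
      have hexp : (((b:Nat):Int) * ((c:Nat):Int)).toNat = b * c := by
        rw [← Nat.cast_mul, Int.toNat_natCast]
      rw [hexp, hS]
      simp
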